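-- pv_equiv track=rewrite | github.com/wipash/rnzdl | main.py | determine_reading_age_category
-- ===== SOURCE A (Python) =====
-- def determine_reading_age_category(reading_ages):
--     """Determine reading age category for organizing files.
--
--     Args:
--         reading_ages: List of reading age objects
--
--     Returns:
--         Reading age category as string
--     """
--     # Map reading age titles to priority values (lower = younger)
--     age_priorities = {
--         "Little Kids": 1,
--         "Kids": 2,
--         "Young Adult": 3
--     }
--
--     # Extract titles and find the youngest age
--     titles = [age.get('title') for age in reading_ages if age.get('title')]
--     if not titles:
--         return "General"  # Default if no ages available
--
--     # Find the youngest age category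
--     youngest_age = min(titles, key=lambda x: age_priorities.get(x, 999))
--     return youngest_age
-- ===== SOURCE B (Python) =====
-- def determine_reading_age_category(reading_ages):
--     """Determine reading age category for organizing files.
--
--     Simpler decomposition: filter the truthy titles, then scan the known
--     category labels in priority order and return the first one present;
--     fall back to the first title (A's min tie-break among unknown titles).
--     """
--     titles = [age.get('title') for age in reading_ages if age.get('title')]
--     if not titles:
--         return "General"
--     for category in ("Little Kids", "Kids", "Young Adult"):
--         if category in titles:
--             return category
--     return titles[0]
-- ===== Notes on version B (the rewrite author's own statement) =====
-- stated objective: simpler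
-- what changed: Replaces the keyed min over titles (dict of priorities + min with a key lambda) by a direct scan of the three category labels in priority order, returning the first label present in the filtered titles and falling back to the first title when none is known.
import Mathlib
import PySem

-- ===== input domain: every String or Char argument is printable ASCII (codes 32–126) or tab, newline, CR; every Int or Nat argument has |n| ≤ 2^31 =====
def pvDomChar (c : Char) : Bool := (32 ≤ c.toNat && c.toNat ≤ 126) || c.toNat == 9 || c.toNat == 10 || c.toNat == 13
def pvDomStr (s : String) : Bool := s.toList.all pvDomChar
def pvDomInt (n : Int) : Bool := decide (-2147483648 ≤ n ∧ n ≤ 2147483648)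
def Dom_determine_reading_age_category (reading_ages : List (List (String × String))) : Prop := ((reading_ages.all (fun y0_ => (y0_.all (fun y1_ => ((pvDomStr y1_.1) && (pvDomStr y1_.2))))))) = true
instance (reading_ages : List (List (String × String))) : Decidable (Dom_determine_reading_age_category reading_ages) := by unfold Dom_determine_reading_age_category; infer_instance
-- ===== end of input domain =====

-- B replaces the keyed min over titles by a priority-ordered scan of the three
-- category labels (objective: simpler); return value only, no mutation involved.

-- ===== PORT A =====
-- age.get('title'): first-match lookup in the association list (Python dict)
def pvGetTitle (age : List (String × String)) : Option String :=
  (PySem.Dict.mk age).get? "title"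

-- titles = [age.get('title') for age in reading_ages if age.get('title')]
-- (a title is truthy iff present and non-empty); identical comprehension in A and B
def pvTitlesOf (reading_ages : List (List (String × String))) : List String :=
  reading_ages.filterMap (fun age =>
    match pvGetTitle age with
    | some t => if t = "" then none else some t
    | none => none)

def determine_reading_age_category (reading_ages : List (List (String × String))) : String :=
  let age_priorities : PySem.Dict String Int :=
    ((PySem.Dict.empty.insert "Little Kids" 1).insert "Kids" 2).insert "Young Adult" 3
  let titles := pvTitlesOf reading_ages
  if titles = [] then "General"
  else
    match PySem.List.min? titles (fun x => age_priorities.getD x 999) with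
    | some youngest_age => youngest_age
    | none => "General"   -- unreachable: titles ≠ []

-- ===== PORT B =====
def determine_reading_age_category_alt (reading_ages : List (List (String × String))) : String :=
  match pvTitlesOf reading_ages with
  | [] => "General"
  | t0 :: rest =>
    let titles := t0 :: rest
    if titles.contains "Little Kids" then "Little Kids"
    else if titles.contains "Kids" then "Kids"
    else if titles.contains "Young Adult" then "Young Adult"
    else t0

-- ===== PRECONDITION & SPEC =====
def Spec_determine_reading_age_category (reading_ages : List (List (String × String))) (out : String) : Prop := out = determine_reading_age_category_alt reading_ages
instance (reading_ages : List (List (String × String))) (out : String) : Decidable (Spec_determine_reading_age_category reading_ages out) := by unfold Spec_determine_reading_age_category; infer_instance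

-- ===== CLAIM (what is proved, stated in full; the proofs are below) =====
def Claim_equal_determine_reading_age_category : Prop := ∀ (reading_ages : List (List (String × String))), Dom_determine_reading_age_category reading_ages → Spec_determine_reading_age_category reading_ages (determine_reading_age_category reading_ages)

-- ===== LEMMAS AND PROOFS =====

-- plain-function form of A's priority key
def pvPrio (x : String) : Int :=
  if x = "Little Kids" then 1 else if x = "Kids" then 2 else if x = "Young Adult" then 3 else 999

theorem pvKey_eq (x : String) :
    PySem.Dict.getD (((PySem.Dict.empty.insert "Little Kids" (1 : Int)).insert "Kids" 2).insert "Young Adult" 3) x 999 = pvPrio x := by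
  have hd : ((PySem.Dict.empty.insert "Little Kids" (1 : Int)).insert "Kids" 2).insert "Young Adult" 3
      = PySem.Dict.mk [("Little Kids", 1), ("Kids", 2), ("Young Adult", 3)] := by decide
  by_cases h1 : x = "Little Kids"
  · subst h1; decide
  by_cases h2 : x = "Kids"
  · subst h2; decide
  by_cases h3 : x = "Young Adult"
  · subst h3; decide
  rw [hd]
  simp [PySem.Dict.getD, PySem.Dict.get?, pvPrio, beq_iff_eq, h1, h2, h3,
    (show ¬ "Little Kids" = x from fun he => h1 he.symm),
    (show ¬ "Kids" = x from fun he => h2 he.symm),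
    (show ¬ "Young Adult" = x from fun he => h3 he.symm)]

theorem pvFoldl_keep {α : Type} (key : α → Int) (t0 : α) (rest : List α)
    (h : ∀ y ∈ rest, ¬ key y < key t0) :
    rest.foldl (fun acc x => match acc with
      | none => some x
      | some m => if key x < key m then some x else some m) (some t0) = some t0 := by
  induction rest with
  | nil => rfl
  | cons y t ih =>
    simp only [List.foldl_cons]
    rw [if_neg (h y (by simp))]
    exact ih (fun z hz => h z (by simp [hz]))

theorem pvMinSel (t0 : String) (rest : List String) :
    PySem.List.min? (t0 :: rest) pvPrio = some
      (if (t0 :: rest).contains "Little Kids" then "Little Kids"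
       else if (t0 :: rest).contains "Kids" then "Kids"
       else if (t0 :: rest).contains "Young Adult" then "Young Adult"
       else t0) := by
  obtain ⟨m, hm⟩ : ∃ m, PySem.List.min? (t0 :: rest) pvPrio = some m := by
    cases h : PySem.List.min? (t0 :: rest) pvPrio with
    | none => exact absurd ((PySem.List.min?_eq_none_iff _ _).mp h) (by simp)
    | some m => exact ⟨m, rfl⟩
  have hmem := PySem.List.min?_mem hm
  have hmin := PySem.List.min?_isMin hm
  rw [hm]
  split_ifs with h1 h2 h3
  · -- "Little Kids" present
    have hle : pvPrio m ≤ 1 := by simpa [pvPrio] using hmin _ (by simpa using h1)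
    have : m = "Little Kids" := by
      by_contra hne
      simp [pvPrio, hne] at hle
      split_ifs at hle <;> omega
    exact congrArg some this
  · -- "Kids" present, "Little Kids" absent
    have hle : pvPrio m ≤ 2 := by simpa [pvPrio] using hmin _ (by simpa using h2)
    have hm1 : m ≠ "Little Kids" := fun he => h1 (by simpa [he] using hmem)
    have : m = "Kids" := by
      by_contra hne
      simp [pvPrio, hm1, hne] at hle
      split_ifs at hle <;> omega
    exact congrArg some this
  · -- "Young Adult" present, the others absent
    have hle : pvPrio m ≤ 3 := by simpa [pvPrio] using hmin _ (by simpa using h3)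
    have hm1 : m ≠ "Little Kids" := fun he => h1 (by simpa [he] using hmem)
    have hm2 : m ≠ "Kids" := fun he => h2 (by simpa [he] using hmem)
    have : m = "Young Adult" := by
      by_contra hne
      simp [pvPrio, hm1, hm2, hne] at hle
    exact congrArg some this
  · -- no known category: every key is 999, min? keeps the first element
    have hall : ∀ y ∈ t0 :: rest, pvPrio y = 999 := by
      intro y hy
      have e1 : y ≠ "Little Kids" := fun he => h1 (by simpa [he] using hy)
      have e2 : y ≠ "Kids" := fun he => h2 (by simpa [he] using hy)
      have e3 : y ≠ "Young Adult" := fun he => h3 (by simpa [he] using hy)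
      simp [pvPrio, e1, e2, e3]
    have ht : PySem.List.min? (t0 :: rest) pvPrio = some t0 := by
      unfold PySem.List.min?
      simp only [List.foldl_cons]
      exact pvFoldl_keep pvPrio t0 rest (fun y hy => by
        rw [hall y (by simp [hy]), hall t0 (by simp)]; omega)
    rw [ht] at hm
    exact congrArg some (Option.some.inj hm).symm

-- ===== VERDICT (by name: the statement is the Claim_ definition above) =====
theorem determine_reading_age_category_spec : Claim_equal_determine_reading_age_category := by
  intro ras _
  unfold Spec_determine_reading_age_category determine_reading_age_category determine_reading_age_category_alt
  cases h : pvTitlesOf ras with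
  | nil => simp
  | cons t0 rest =>
    have hk : (fun x => PySem.Dict.getD
        (((PySem.Dict.empty.insert "Little Kids" (1 : Int)).insert "Kids" 2).insert "Young Adult" 3) x 999)
        = pvPrio := funext pvKey_eq
    simp only [if_neg (by simp : ¬ (t0 :: rest = [])), hk, pvMinSel]
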